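-- pv_equiv track=rewrite | github.com/TeamHG-Memex/hh-page-classifier | hh_page_clf/train.py | _exactly_n_items
-- ===== SOURCE A (Python) =====
-- def _exactly_n_items(lst, n):
--     assert len(lst) > 0
--     result = []
--     while True:
--         for x in lst:
--             result.append(x)
--             if len(result) == n:
--                 return result
-- ===== SOURCE B (Python) =====
-- def _exactly_n_items(lst, n):
--     assert len(lst) > 0
--     return (lst * (n // len(lst) + 1))[:n]
-- ===== Notes on version B (the rewrite author's own statement) =====
-- stated objective: simpler
-- what changed: Replaces the incremental append loop (nested while/for with length check) by one closed-form construction: repeat the list n//len(lst)+1 times and slice to n items.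
-- outside the precondition, e.g. on _exactly_n_items([1, 2], 0): A does not finish within the time limit, B returns []; on _exactly_n_items([], 3): A raises AssertionError, B raises AssertionError
import Mathlib
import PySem

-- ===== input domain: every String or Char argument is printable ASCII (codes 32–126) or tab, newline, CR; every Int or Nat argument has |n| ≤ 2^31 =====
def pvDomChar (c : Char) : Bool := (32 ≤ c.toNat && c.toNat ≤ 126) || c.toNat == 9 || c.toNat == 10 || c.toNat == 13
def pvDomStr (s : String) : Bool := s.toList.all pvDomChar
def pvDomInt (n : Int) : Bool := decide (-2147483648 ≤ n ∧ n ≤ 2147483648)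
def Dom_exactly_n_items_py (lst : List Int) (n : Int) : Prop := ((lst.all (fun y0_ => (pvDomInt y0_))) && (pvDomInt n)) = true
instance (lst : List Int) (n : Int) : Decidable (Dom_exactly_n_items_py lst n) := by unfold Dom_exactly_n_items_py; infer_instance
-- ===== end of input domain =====

-- B replaces A's incremental append loop by one closed-form construction (repeat + slice); equal on Pre_ (nonempty list, n ≥ 1).

-- ===== PORT A =====
-- the inner 'for x in lst: result.append(x); if len(result) == n: return result':
-- Sum.inl = early return of the finished result, Sum.inr = pass over lst ended, loop again
def exactlyNFor (lst : List Int) (n : Int) (result : List Int) : Sum (List Int) (List Int) :=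
  match lst with
  | [] => Sum.inr result
  | x :: xs =>
    let r := result ++ [x]
    if (r.length : Int) = n then Sum.inl r else exactlyNFor xs n r

-- the 'while True' loop, with fuel (Python diverges when it runs out, i.e. for n ≤ 0; excluded by Pre_)
def exactlyNWhile (lst : List Int) (n : Int) (result : List Int) : Nat → List Int
  | 0 => result
  | fuel + 1 =>
    match exactlyNFor lst n result with
    | Sum.inl res => res
    | Sum.inr result' => exactlyNWhile lst n result' fuel

def exactly_n_items_py (lst : List Int) (n : Int) : List Int :=
  -- 'assert len(lst) > 0' raises on [] (excluded by Pre_)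
  if lst.length > 0 then exactlyNWhile lst n [] n.toNat else []

-- ===== PORT B =====
def exactly_n_items_py_alt (lst : List Int) (n : Int) : List Int :=
  if lst.length > 0 then
    -- (lst * (n // len(lst) + 1))[:n]
    PySem.List.slice ((List.replicate (PySem.Int.floordiv n lst.length + 1).toNat lst).flatten)
      none (some n)
  else []

-- ===== PRECONDITION & SPEC =====
-- Pre_ excludes lst = [] (the assert raises AssertionError) and n ≤ 0 (A's while-loop never returns: diverges).
def Pre_exactly_n_items_py (lst : List Int) (n : Int) : Prop := lst ≠ [] ∧ 1 ≤ n
instance (lst : List Int) (n : Int) : Decidable (Pre_exactly_n_items_py lst n) := by unfold Pre_exactly_n_items_py; infer_instance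
def pvWitness_exactly_n_items_py : List Int × Int := ([3, 1], 5)

def Spec_exactly_n_items_py (lst : List Int) (n : Int) (out : List Int) : Prop := out = exactly_n_items_py_alt lst n
instance (lst : List Int) (n : Int) (out : List Int) : Decidable (Spec_exactly_n_items_py lst n out) := by unfold Spec_exactly_n_items_py; infer_instance

-- ===== CLAIM (what is proved, stated in full; the proofs are below) =====
def Claim_equal_exactly_n_items_py : Prop := ∀ (lst : List Int) (n : Int), Dom_exactly_n_items_py lst n → Pre_exactly_n_items_py lst n → Spec_exactly_n_items_py lst n (exactly_n_items_py lst n)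

-- ===== LEMMAS AND PROOFS =====

-- one pass of the for loop: with r.length < n it either finishes the result (early return) or appends all of lst
theorem exactlyNFor_eq (lst : List Int) (n : Int) (r : List Int) (hr : (r.length : Int) < n) :
    exactlyNFor lst n r =
      if (n : Int) ≤ r.length + lst.length then Sum.inl (r ++ lst.take (n - r.length).toNat)
      else Sum.inr (r ++ lst) := by
  induction lst generalizing r with
  | nil =>
    simp [exactlyNFor]
    omega
  | cons x xs ih =>
    simp only [exactlyNFor]
    by_cases h : ((r ++ [x]).length : Int) = n
    · rw [if_pos h, if_pos (by simp at h ⊢; omega)]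
      have h1 : (n - (r.length : Int)).toNat = 1 := by simp at h; omega
      simp [h1]
    · rw [if_neg h, ih (r ++ [x]) (by simp at h ⊢; omega)]
      have hlen : ((r ++ [x]).length : Int) = r.length + 1 := by simp
      by_cases hc : (n : Int) ≤ r.length + (x :: xs).length
      · rw [if_pos (by simp at hc ⊢; omega), if_pos hc]
        have h2 : (n - (r.length : Int)).toNat = (n - ((r ++ [x]).length : Int)).toNat + 1 := by
          simp at h ⊢; omega
        simp [h2, List.take_succ_cons]
      · rw [if_neg (by simp at hc ⊢; omega), if_neg hc]
        simp

-- invariant of the while loop: with enough fuel it returns the cyclic completion of r to n items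
theorem exactlyNWhile_eq (lst : List Int) (n : Int) (fuel : Nat) :
    ∀ (r : List Int), (r.length : Int) < n → (n : Int) ≤ r.length + fuel * lst.length →
      exactlyNWhile lst n r fuel =
        r ++ ((List.replicate fuel lst).flatten).take (n - r.length).toNat := by
  induction fuel with
  | zero => intro r h1 h2; exfalso; omega
  | succ f ih =>
    intro r h1 h2
    rw [exactlyNWhile, exactlyNFor_eq lst n r h1]
    by_cases hc : (n : Int) ≤ r.length + lst.length
    · rw [if_pos hc]
      show r ++ _ = _
      simp only [List.replicate_succ, List.flatten_cons]
      rw [List.take_append_of_le_length (by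
        have : (n - (r.length : Int)).toNat ≤ lst.length := by omega
        simpa using this)]
    · rw [if_neg hc]
      show exactlyNWhile lst n (r ++ lst) f = _
      rw [ih (r ++ lst) (by simp; omega) (by simp; push_cast at h2; nlinarith)]
      have hidx : ((n - ((r ++ lst).length : Int)).toNat) = (n - (r.length : Int)).toNat - lst.length := by
        simp only [List.length_append]; omega
      simp only [List.replicate_succ, List.flatten_cons, List.append_assoc, hidx]
      congr 1
      rw [List.take_append,
        show lst.take ((n - (r.length : Int)).toNat) = lst from List.take_of_length_le (by omega)]

-- taking n items from a flattened replication does not depend on the count, once it covers n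
theorem take_flatten_replicate (lst : List Int) (m : Nat) :
    ∀ (f g : Nat), m ≤ f * lst.length → m ≤ g * lst.length →
      ((List.replicate f lst).flatten).take m = ((List.replicate g lst).flatten).take m := by
  have key : ∀ (f g : Nat), f ≤ g → m ≤ f * lst.length →
      ((List.replicate g lst).flatten).take m = ((List.replicate f lst).flatten).take m := by
    intro f g hfg hm
    obtain ⟨d, rfl⟩ : ∃ d, g = f + d := ⟨g - f, by omega⟩
    rw [List.replicate_add, List.flatten_append,
      List.take_append_of_le_length (by simp [List.length_flatten]; simpa using hm)]
  intro f g hf hg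
  rcases Nat.le_total f g with h | h
  · rw [key f g h hf]
  · rw [key g f h hg]

-- ===== VERDICT (by name: the statement is the Claim_ definition above) =====
theorem exactly_n_items_py_spec : Claim_equal_exactly_n_items_py := by
  intro lst n _ ⟨hl, hn⟩
  unfold Spec_exactly_n_items_py exactly_n_items_py exactly_n_items_py_alt
  have hlen : 0 < lst.length := List.length_pos_iff.mpr hl
  rw [if_pos hlen, if_pos hlen]
  rw [PySem.List.slice_to (hb := by omega)]
  rw [exactlyNWhile_eq lst n n.toNat [] (by simpa using hn) (by
    have : (n.toNat : Int) = n := by omega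
    nlinarith [Int.toNat_of_nonneg (le_of_lt (lt_of_lt_of_le one_pos hn)), Int.natCast_pos.mpr hlen])]
  simp only [List.nil_append, List.length_nil, Nat.cast_zero, sub_zero]
  apply take_flatten_replicate
  · have : 1 ≤ lst.length := hlen
    nlinarith [Nat.le_mul_of_pos_right n.toNat hlen]
  · -- (n // len + 1) * len ≥ n : floor-division bracket
    have hq := PySem.Int.floordiv_mul_add_mod n lst.length
    have hmod : PySem.Int.mod n lst.length < lst.length := by
      rw [PySem.Int.mod_eq_emod_of_pos (h := by exact_mod_cast hlen)]
      exact Int.emod_lt_of_pos n (by exact_mod_cast hlen)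
    have h1 : (((PySem.Int.floordiv n lst.length + 1).toNat : Int)) ≥ PySem.Int.floordiv n lst.length + 1 := Int.self_le_toNat _
    have hpos := Int.natCast_pos.mpr hlen
    have hnn : ((n.toNat : Int)) = n := by omega
    have h3 := mul_le_mul_of_nonneg_right h1 (le_of_lt hpos)
    zify
    nlinarith
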